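-- pv_equiv track=rewrite | github.com/acbdwwwwwwwwg/SSCTV-RPCA | 生成目录.py | dedup_names
-- ===== SOURCE A (Python) =====
-- from typing import List, Optional
--
-- def dedup_names(names: List[str]) -> List[str]:
--     seen = {}
--     result = []
--     for n in names:
--         base = n
--         if base in seen:
--             seen[base] += 1
--             n = f"{base}_{seen[base]}"
--         else:
--             seen[base] = 0
--         result.append(n)
--     return result
-- ===== SOURCE B (Python) =====
-- def dedup_names(names):
--     # Group-then-scatter: collect the positions of each distinct name in one pass,
--     # then write the k-th occurrence (suffixed with _k for k>0) back into an output
--     # array by position. Correct because A's running counter for a name equals the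
--     # occurrence rank, and generated suffixed names are never registered by A either.
--     groups = {}
--     for i, n in enumerate(names):
--         groups.setdefault(n, []).append(i)
--     out = [None] * len(names)
--     for n, idxs in groups.items():
--         for k, i in enumerate(idxs):
--             out[i] = n if k == 0 else f"{n}_{k}"
--     return out
-- ===== Notes on version B (the rewrite author's own statement) =====
-- stated objective: alternative
-- what changed: Replaces A's single left-to-right pass with a running counter dict by a group-then-scatter algorithm: first collect each distinct name's list of positions, then write the rank-suffixed names back into a preallocated output array by position.
import Mathlib
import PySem

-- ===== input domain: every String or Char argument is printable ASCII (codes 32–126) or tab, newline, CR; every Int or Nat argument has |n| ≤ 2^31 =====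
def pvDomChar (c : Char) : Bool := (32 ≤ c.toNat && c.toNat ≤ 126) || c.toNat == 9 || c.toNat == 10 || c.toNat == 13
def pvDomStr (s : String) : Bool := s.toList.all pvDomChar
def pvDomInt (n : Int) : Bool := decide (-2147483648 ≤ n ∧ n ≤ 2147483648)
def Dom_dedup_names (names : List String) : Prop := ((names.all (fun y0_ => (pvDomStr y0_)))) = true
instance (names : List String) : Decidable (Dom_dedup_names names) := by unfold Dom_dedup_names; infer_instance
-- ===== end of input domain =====

-- B replaces A's single left-to-right pass with a running counter dict by a staged
-- group-then-scatter algorithm: collect each distinct name's positions, then write the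
-- rank-suffixed names back into a preallocated output array by position (alternative).


-- ===== PORT A =====
-- one loop iteration of A: look the name up in `seen`, bump-and-suffix or register it
def dedupStepA (st : PySem.Dict String Int × List String) (n : String) :
    PySem.Dict String Int × List String :=
  if st.1.contains n then
    let v := st.1.getD n 0 + 1
    (st.1.insert n v, st.2 ++ [n ++ "_" ++ PySem.Int.toStr v])
  else
    (st.1.insert n 0, st.2 ++ [n])

def dedup_names (names : List String) : List String :=
  (names.foldl dedupStepA (PySem.Dict.empty, [])).2

-- ===== PORT B =====
-- n if k == 0 else f"{n}_{k}"
def suffB (n : String) (k : Nat) : String :=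
  if k = 0 then n else n ++ "_" ++ PySem.Int.toStr (k : Int)

def dedup_names_alt (names : List String) : List String :=
  -- groups.setdefault(n, []).append(i)  ==  modify n [] (· ++ [i]); enumerate indices are
  -- nonnegative, kept as Nat. Python preallocates [None]*len and overwrites every slot
  -- (proved below); the placeholder here is "".
  let groups := names.zipIdx.foldl (fun d p => d.modify p.1 [] (· ++ [p.2])) PySem.Dict.empty
  let out0 := names.map (fun _ => "")
  groups.items.foldl (fun out pr =>
    pr.2.zipIdx.foldl (fun out q => out.set q.1 (suffB pr.1 q.2)) out) out0

-- ===== PRECONDITION & SPEC =====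
def Spec_dedup_names (names : List String) (out : List String) : Prop := out = dedup_names_alt names
instance (names : List String) (out : List String) : Decidable (Spec_dedup_names names out) := by unfold Spec_dedup_names; infer_instance

-- ===== CLAIM (what is proved, stated in full; the proofs are below) =====
def Claim_equal_dedup_names : Prop := ∀ (names : List String), Dom_dedup_names names → Spec_dedup_names names (dedup_names names)

-- ===== LEMMAS AND PROOFS =====

-- the value both programs place at position i: names[i] suffixed by its prior-occurrence count
def tgt (names : List String) (i : Nat) : String :=
  suffB (names.getD i "") ((names.take i).count (names.getD i ""))

-- the intended output of the suffix-by-prior-count process, written as A produces it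
def dedupSpine (pre rest : List String) : List String :=
  match rest with
  | [] => []
  | n :: rs => suffB n (pre.count n) :: dedupSpine (pre ++ [n]) rs

-- the invariant A's dict satisfies after processing `pre`
def seenInv (d : PySem.Dict String Int) (pre : List String) : Prop :=
  ∀ n, (d.contains n = decide (n ∈ pre)) ∧ (n ∈ pre → d.getD n 0 = (pre.count n : Int) - 1)

lemma seenInv_empty : seenInv PySem.Dict.empty [] := by
  intro n; simp [PySem.Dict.contains_empty]

lemma seenInv_step (d : PySem.Dict String Int) (pre : List String) (n : String)
    (h : seenInv d pre) :
    seenInv (if d.contains n then d.insert n (d.getD n 0 + 1) else d.insert n 0) (pre ++ [n]) := by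
  intro m
  have hc := (h n).1
  have hm := (h m).1
  by_cases hmem : n ∈ pre
  · rw [hc] at *
    simp only [hmem, decide_true, if_pos]
    constructor
    · rw [PySem.Dict.contains_insert, hm]
      by_cases hmn : m = n <;> simp [hmn, hmem]
    · intro _
      by_cases hmn : m = n
      · subst hmn
        rw [PySem.Dict.getD_insert_self, (h m).2 hmem]
        simp [List.count_append]
      · have : m ∈ pre := by
          rcases List.mem_append.mp (by assumption) with h1 | h1
          · exact h1
          · simp at h1; exact absurd h1 hmn
        rw [PySem.Dict.getD_insert_of_ne _ _ _ hmn, (h m).2 this]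
        simp [List.count_append, List.count_singleton]
        exact fun h => hmn h.symm
  · rw [hc] at *
    simp only [hmem, decide_false, if_neg, Bool.false_eq_true, not_false_iff]
    constructor
    · rw [PySem.Dict.contains_insert, hm]
      by_cases hmn : m = n <;> simp [hmn, hmem]
    · intro hmp
      by_cases hmn : m = n
      · subst hmn
        rw [PySem.Dict.getD_insert_self]
        have : pre.count m = 0 := List.count_eq_zero.mpr hmem
        simp [List.count_append, this]
      · have : m ∈ pre := by
          rcases List.mem_append.mp hmp with h1 | h1
          · exact h1
          · simp at h1; exact absurd h1 hmn
        rw [PySem.Dict.getD_insert_of_ne _ _ _ hmn, (h m).2 this]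
        simp [List.count_append, List.count_singleton]
        exact fun h => hmn h.symm

-- A's fold, started from any state satisfying the invariant, appends the spine
lemma foldA_spine (rest : List String) :
    ∀ (pre : List String) (d : PySem.Dict String Int) (out : List String),
      seenInv d pre →
      (rest.foldl dedupStepA (d, out)).2 = out ++ dedupSpine pre rest := by
  induction rest with
  | nil => intro pre d out _; simp [dedupSpine]
  | cons n rs ih =>
    intro pre d out h
    have hc := (h n).1
    have hstep := seenInv_step d pre n h
    by_cases hmem : n ∈ pre
    · have hcount : pre.count n ≠ 0 := by
        exact fun hz => (List.count_eq_zero.mp hz) hmem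
      have hct : d.contains n = true := by rw [hc]; simp [hmem]
      have hv : d.getD n 0 + 1 = (pre.count n : Int) := by
        rw [(h n).2 hmem]; ring
      simp only [List.foldl_cons, dedupStepA, hct, if_pos]
      rw [ih (pre ++ [n]) _ _ (by simpa [hct] using hstep)]
      simp [dedupSpine, suffB, hcount, hv]
    · have hcount : pre.count n = 0 := List.count_eq_zero.mpr hmem
      have hct : d.contains n = false := by rw [hc]; simp [hmem]
      simp only [List.foldl_cons, dedupStepA, hct, Bool.false_eq_true, if_neg, not_false_iff]
      rw [ih (pre ++ [n]) _ _ (by simpa [hct] using hstep)]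
      simp [dedupSpine, suffB, hcount]

lemma spine_length (rest : List String) : ∀ pre, (dedupSpine pre rest).length = rest.length := by
  induction rest with
  | nil => intro pre; simp [dedupSpine]
  | cons n rs ih => intro pre; simp [dedupSpine, ih]

-- the spine, pointwise: position i carries names[i] suffixed by its prior-occurrence count
lemma spine_get (rest : List String) :
    ∀ (pre : List String) (i : Nat), i < rest.length →
      (dedupSpine pre rest)[i]? =
        some (suffB (rest.getD i "") ((pre ++ rest.take i).count (rest.getD i ""))) := by
  induction rest with
  | nil => intro pre i h; simp at h
  | cons n rs ih =>
    intro pre i h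
    cases i with
    | zero => simp [dedupSpine]
    | succ j =>
      have hj : j < rs.length := by simpa using h
      simp only [dedupSpine, List.getElem?_cons_succ]
      rw [ih (pre ++ [n]) j hj]
      simp [List.append_assoc]

-- ----- B side -----

-- the positions (from offset k) at which `n` occurs in `rest`
def occF (k : Nat) (rest : List String) (n : String) : List Nat :=
  ((rest.zipIdx k).filter (fun p => p.1 == n)).map (·.2)

lemma occF_cons_self (k : Nat) (n : String) (ms : List String) :
    occF k (n :: ms) n = k :: occF (k + 1) ms n := by
  simp [occF, List.zipIdx_cons]

lemma occF_cons_ne (k : Nat) (m : String) (ms : List String) (n : String) (h : m ≠ n) :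
    occF k (m :: ms) n = occF (k + 1) ms n := by
  simp [occF, List.zipIdx_cons, h]

-- B's inner scatter loop over one name's position list, pointwise
lemma inner_scatter (names : List String) (n : String) (rest : List String) :
    ∀ (k : Nat) (out : List String), names.drop k = rest → out.length = names.length →
      (((occF k rest n).zipIdx ((names.take k).count n)).foldl
          (fun out q => out.set q.1 (suffB n q.2)) out).length = out.length ∧
      ∀ i : Nat,
        (((occF k rest n).zipIdx ((names.take k).count n)).foldl
            (fun out q => out.set q.1 (suffB n q.2)) out)[i]? =
          if k ≤ i ∧ names[i]? = some n then some (tgt names i) else out[i]? := by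
  induction rest with
  | nil =>
    intro k out hdrop hlen
    have hk : names.length ≤ k := by
      by_contra hlt
      have : (names.drop k).length = names.length - k := List.length_drop ..
      rw [hdrop] at this; simp at this; omega
    refine ⟨by simp [occF], fun i => ?_⟩
    simp only [occF, List.zipIdx_nil, List.filter_nil, List.map_nil, List.foldl_nil]
    have : ¬ (k ≤ i ∧ names[i]? = some n) := by
      rintro ⟨hki, hsome⟩
      have := List.getElem?_eq_none_iff.mpr (by omega : names.length ≤ i)
      rw [this] at hsome; cases hsome
    rw [if_neg this]
  | cons m ms ih =>
    intro k out hdrop hlen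
    have hklt : k < names.length := by
      by_contra hge
      have := List.drop_eq_nil_of_le (by omega : names.length ≤ k)
      rw [hdrop] at this; cases this
    have hnk : names[k]? = some m := by
      have h0 : (names.drop k)[0]? = names[k + 0]? := List.getElem?_drop
      rw [hdrop] at h0; simpa using h0.symm
    have hdrop' : names.drop (k + 1) = ms := by
      have h1 : (names.drop k).drop 1 = names.drop (k + 1) := List.drop_drop
      rw [hdrop] at h1; simpa using h1.symm
    have htake : names.take (k + 1) = names.take k ++ [m] := by
      rw [List.take_add_one, hnk]; rfl
    by_cases hmn : m = n
    · subst hmn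
      have hcnt : (names.take (k + 1)).count m = (names.take k).count m + 1 := by
        simp [htake, List.count_append]
      rw [occF_cons_self, List.zipIdx_cons, List.foldl_cons]
      set out1 := out.set k (suffB m ((names.take k).count m)) with hout1
      have hlen1 : out1.length = names.length := by simp [hout1, hlen]
      have hIH := ih (k + 1) out1 hdrop' hlen1
      rw [hcnt] at hIH
      refine ⟨by rw [hIH.1]; simp [hout1], fun i => ?_⟩
      rw [hIH.2 i]
      by_cases hik : i = k
      · subst hik
        rw [if_neg (by rintro ⟨h1, _⟩; omega), if_pos ⟨le_refl i, hnk⟩]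
        have hset : out1[i]? = some (suffB m ((names.take i).count m)) := by
          simp [hout1, List.getElem?_set_self (by omega : i < out.length)]
        rw [hset]
        simp [tgt, hnk]
      · have hset : out1[i]? = out[i]? := by
          simp [hout1, List.getElem?_set_ne (fun h => hik h.symm)]
        by_cases hcond : k ≤ i ∧ names[i]? = some m
        · rw [if_pos ⟨by omega, hcond.2⟩, if_pos hcond]
        · rw [if_neg (by rintro ⟨h1, h2⟩; exact hcond ⟨by omega, h2⟩), if_neg hcond, hset]
    · have hcnt : (names.take (k + 1)).count n = (names.take k).count n := by
        simp [htake, List.count_append, hmn]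
      rw [occF_cons_ne _ _ _ _ hmn]
      have hIH := ih (k + 1) out hdrop' hlen
      rw [hcnt] at hIH
      refine ⟨hIH.1, fun i => ?_⟩
      rw [hIH.2 i]
      by_cases hik : i = k
      · subst hik
        rw [if_neg (by rintro ⟨h1, _⟩; omega),
            if_neg (by rintro ⟨_, h2⟩; rw [hnk] at h2; exact hmn (by simpa using h2))]
      · by_cases hcond : k ≤ i ∧ names[i]? = some n
        · rw [if_pos ⟨by omega, hcond.2⟩, if_pos hcond]
        · rw [if_neg (by rintro ⟨h1, h2⟩; exact hcond ⟨by omega, h2⟩), if_neg hcond]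

-- B's outer loop over the grouped items: every position whose name has a group gets tgt
lemma outer_scatter (names : List String) (ps : List (String × List Nat)) :
    ∀ (out : List String), out.length = names.length →
      (∀ pr ∈ ps, pr.2 = occF 0 names pr.1) →
      (ps.foldl (fun out pr =>
          pr.2.zipIdx.foldl (fun out q => out.set q.1 (suffB pr.1 q.2)) out) out).length
        = names.length ∧
      ∀ i : Nat,
        ((∃ pr ∈ ps, names[i]? = some pr.1) →
          (ps.foldl (fun out pr =>
              pr.2.zipIdx.foldl (fun out q => out.set q.1 (suffB pr.1 q.2)) out) out)[i]?
            = some (tgt names i)) ∧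
        ((¬ ∃ pr ∈ ps, names[i]? = some pr.1) →
          (ps.foldl (fun out pr =>
              pr.2.zipIdx.foldl (fun out q => out.set q.1 (suffB pr.1 q.2)) out) out)[i]?
            = out[i]?) := by
  induction ps with
  | nil => intro out hlen _; exact ⟨hlen, fun i => ⟨by rintro ⟨pr, h, _⟩; simp at h, fun _ => rfl⟩⟩
  | cons pr ps ih =>
    intro out hlen hocc
    have hpr := hocc pr (by simp)
    have hinner := inner_scatter names pr.1 names 0 out (by simp) hlen
    simp only [List.take_zero, List.count_nil] at hinner
    set out1 := (occF 0 names pr.1).zipIdx.foldl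
        (fun out q => out.set q.1 (suffB pr.1 q.2)) out with hout1
    have hlen1 : out1.length = names.length := by rw [hinner.1, hlen]
    have hpt1 : ∀ i : Nat, out1[i]? =
        if 0 ≤ i ∧ names[i]? = some pr.1 then some (tgt names i) else out[i]? := hinner.2
    have hIH := ih out1 hlen1 (fun q hq => hocc q (by simp [hq]))
    simp only [List.foldl_cons, hpr, ← hout1]
    refine ⟨hIH.1, fun i => ⟨?_, ?_⟩⟩
    · rintro ⟨q, hq, hsome⟩
      rcases List.mem_cons.mp hq with hq | hq
      · subst hq
        by_cases hrest : ∃ q' ∈ ps, names[i]? = some q'.1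
        · exact (hIH.2 i).1 hrest
        · rw [(hIH.2 i).2 hrest, hpt1 i]
          simp [hsome]
      · exact (hIH.2 i).1 ⟨q, hq, hsome⟩
    · intro hnone
      have hrest : ¬ ∃ q' ∈ ps, names[i]? = some q'.1 := by
        rintro ⟨q', hq', hs⟩; exact hnone ⟨q', by simp [hq'], hs⟩
      rw [(hIH.2 i).2 hrest, hpt1 i]
      have : ¬ names[i]? = some pr.1 := fun hs => hnone ⟨pr, by simp, hs⟩
      simp [this]

-- B computes tgt at every position
lemma alt_get (names : List String) :
    (dedup_names_alt names).length = names.length ∧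
    ∀ i : Nat, i < names.length → (dedup_names_alt names)[i]? = some (tgt names i) := by
  unfold dedup_names_alt
  set d := names.zipIdx.foldl (fun d p => d.modify p.1 [] (· ++ [p.2])) PySem.Dict.empty with hd
  have hnodup : d.keys.Nodup := by
    rw [hd]
    exact PySem.Dict.nodup_keys_foldl_modify_key names.zipIdx Prod.fst [] (fun d p => (· ++ [p.2]))
      PySem.Dict.empty (by simp)
  have hkeys : ∀ n, n ∈ names → n ∈ d.keys := by
    intro n hn
    rw [hd, PySem.Dict.keys_foldl_modify_key names.zipIdx Prod.fst []
      (fun d p => (· ++ [p.2])) PySem.Dict.empty]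
    rw [PySem.Set.mem_update]
    right; simpa using hn
  have hgetD : ∀ n, d.getD n [] = occF 0 names n := by
    intro n
    rw [hd, PySem.Dict.getD_foldl_modify_append names.zipIdx PySem.Dict.empty n]
    simp [occF, PySem.Dict.getD_empty]
  have hitems : d.items = d.keys.map (fun k => (k, d.getD k [])) :=
    PySem.Dict.items_eq_map_keys d hnodup []
  have hocc : ∀ pr ∈ d.items, pr.2 = occF 0 names pr.1 := by
    intro pr hpr
    rw [hitems] at hpr
    rcases List.mem_map.mp hpr with ⟨k, _, hk⟩
    rw [← hk]; exact hgetD k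
  have houter := outer_scatter names d.items (names.map (fun _ => "")) (by simp) hocc
  refine ⟨houter.1, fun i hi => ?_⟩
  have hni : names[i]? = some names[i] := List.getElem?_eq_getElem hi
  have hmem : names[i] ∈ names := List.getElem_mem hi
  have hkey : names[i] ∈ d.keys := hkeys _ hmem
  have : ∃ pr ∈ d.items, names[i]? = some pr.1 := by
    have : d.keys = d.items.map (·.1) := rfl
    rw [this] at hkey
    rcases List.mem_map.mp hkey with ⟨pr, hpr, hfst⟩
    exact ⟨pr, hpr, by rw [hni, hfst]⟩
  exact (houter.2 i).1 this

-- ===== VERDICT (by name: the statement is the Claim_ definition above) =====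
theorem dedup_names_spec : Claim_equal_dedup_names := by
  intro names _
  show dedup_names names = dedup_names_alt names
  have hA : dedup_names names = dedupSpine [] names := by
    rw [dedup_names, foldA_spine names [] PySem.Dict.empty [] seenInv_empty]; simp
  have hB := alt_get names
  rw [hA]
  apply List.ext_getElem?_iff.mpr
  intro i
  by_cases hi : i < names.length
  · rw [hB.2 i hi, spine_get names [] i (by simpa using hi)]
    simp [tgt]
  · rw [List.getElem?_eq_none_iff.mpr (by rw [spine_length]; omega),
        List.getElem?_eq_none_iff.mpr (by rw [hB.1]; omega)]
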